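-- pv_equiv track=rewrite | github.com/microsoft/evodiff | generate/conditional_generation_msa.py | mask_sequence
-- ===== SOURCE A (Python) =====
-- def mask_sequence(seq, mask_locations, mask_id):
--     masked_seq = []
--     for i in range(len(seq)):
--         if i in mask_locations:
--             masked_seq.append(mask_id)
--         else:
--             masked_seq.append(seq[i])
--     return masked_seq
-- ===== SOURCE B (Python) =====
-- def mask_sequence(seq, mask_locations, mask_id):
--     masked_seq = list(seq)
--     for loc in set(mask_locations) & set(range(len(seq))):
--         masked_seq[loc] = mask_id
--     return masked_seq
-- ===== Notes on version B (the rewrite author's own statement) =====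
-- stated objective: faster
-- what changed: Instead of scanning every index with an O(m) list-membership test, B copies the sequence and patches only the valid masked positions (the set intersection of mask_locations with the index range), removing the inner scan.
import Mathlib
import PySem

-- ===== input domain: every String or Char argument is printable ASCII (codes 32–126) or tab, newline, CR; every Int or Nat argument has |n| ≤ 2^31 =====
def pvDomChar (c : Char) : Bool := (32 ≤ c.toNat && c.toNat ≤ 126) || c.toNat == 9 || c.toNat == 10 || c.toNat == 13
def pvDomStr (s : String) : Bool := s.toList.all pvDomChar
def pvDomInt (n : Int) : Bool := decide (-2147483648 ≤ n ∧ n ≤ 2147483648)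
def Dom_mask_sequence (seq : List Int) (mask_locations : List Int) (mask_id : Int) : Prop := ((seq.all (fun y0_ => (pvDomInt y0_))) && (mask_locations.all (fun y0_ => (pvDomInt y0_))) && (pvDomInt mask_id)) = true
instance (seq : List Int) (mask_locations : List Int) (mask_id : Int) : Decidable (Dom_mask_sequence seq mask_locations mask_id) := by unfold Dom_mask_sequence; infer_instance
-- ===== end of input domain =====

-- B replaces A's scan of every index (with a list-membership test per index) by copying the
-- sequence and patching only the valid masked positions (set intersection with the index range).

-- ===== PORT A =====
-- for i in range(len(seq)): append mask_id if i in mask_locations else seq[i]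
-- seq[i] is ported as seq.getD i 0 — exact, since i < len(seq) for every i of range(len(seq)).
def mask_sequence (seq : List Int) (mask_locations : List Int) (mask_id : Int) : List Int :=
  (List.range seq.length).foldl
    (fun masked_seq (i : Nat) =>
      if ((i : Int)) ∈ mask_locations then masked_seq ++ [mask_id]
      else masked_seq ++ [seq.getD i 0]) []

-- ===== PORT B =====
-- masked_seq = list(seq); for loc in set(mask_locations) & set(range(len(seq))): masked_seq[loc] = mask_id
-- masked_seq[loc] = mask_id is ported as List.set loc.toNat — exact, since every loc of the
-- intersection satisfies 0 ≤ loc < len(seq); the set's iteration order does not affect the result.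
def mask_sequence_alt (seq : List Int) (mask_locations : List Int) (mask_id : Int) : List Int :=
  let patch := PySem.Set.inter (PySem.Set.ofList mask_locations)
                 ((List.range seq.length).map (fun (i : Nat) => ((i : Int))))
  patch.foldl (fun masked_seq loc => masked_seq.set loc.toNat mask_id) seq

-- ===== PRECONDITION & SPEC =====
def Spec_mask_sequence (seq : List Int) (mask_locations : List Int) (mask_id : Int) (out : List Int) : Prop := out = mask_sequence_alt seq mask_locations mask_id
instance (seq : List Int) (mask_locations : List Int) (mask_id : Int) (out : List Int) : Decidable (Spec_mask_sequence seq mask_locations mask_id out) := by unfold Spec_mask_sequence; infer_instance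

-- ===== CLAIM (what is proved, stated in full; the proofs are below) =====
def Claim_equal_mask_sequence : Prop := ∀ (seq : List Int) (mask_locations : List Int) (mask_id : Int), Dom_mask_sequence seq mask_locations mask_id → Spec_mask_sequence seq mask_locations mask_id (mask_sequence seq mask_locations mask_id)

-- ===== LEMMAS AND PROOFS =====

-- A's append-loop is a map over the index range.
lemma maskA_foldl_map (seq mask_locations : List Int) (mask_id : Int) :
    ∀ (l : List Nat) (acc : List Int),
      l.foldl (fun masked_seq (i : Nat) =>
          if ((i : Int)) ∈ mask_locations then masked_seq ++ [mask_id]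
          else masked_seq ++ [seq.getD i 0]) acc
        = acc ++ l.map (fun (i : Nat) => if ((i : Int)) ∈ mask_locations then mask_id else seq.getD i 0) := by
  intro l
  induction l with
  | nil => simp
  | cons x xs ih =>
    intro acc
    simp only [List.foldl_cons, List.map_cons]
    rw [ih]
    by_cases h : ((x : Int)) ∈ mask_locations <;> simp [h]

-- Patching a copy at a list of in-range positions: each cell holds v iff its index is in the list.
lemma foldl_set_getElem? (v : Int) :
    ∀ (L s : List Int) (i : Nat), (∀ x ∈ L, 0 ≤ x ∧ x < (s.length : Int)) →
      (L.foldl (fun a loc => a.set loc.toNat v) s)[i]?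
        = if ((i : Int)) ∈ L then some v else s[i]? := by
  intro L
  induction L with
  | nil => intro s i _; simp
  | cons x xs ih =>
    intro s i hL
    have hx := hL x (by simp)
    have hxs : ∀ y ∈ xs, 0 ≤ y ∧ y < ((s.set x.toNat v).length : Int) := by
      intro y hy; simpa using hL y (by simp [hy])
    simp only [List.foldl_cons]
    rw [ih _ i hxs]
    by_cases hmem : ((i : Int)) ∈ xs
    · rw [if_pos hmem, if_pos (List.mem_cons_of_mem _ hmem)]
    · rw [if_neg hmem]
      by_cases hxi : x = ((i : Int))
      · have hlt : i < s.length := by omega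
        have hti : x.toNat = i := by omega
        rw [if_pos (by rw [hxi]; exact List.mem_cons_self), List.getElem?_set,
          if_pos hti, if_pos (by omega)]
      · have hne : x.toNat ≠ i := by omega
        have hni : ((i : Int)) ∉ x :: xs := by
          intro h
          rcases List.mem_cons.mp h with h | h
          · exact hxi h.symm
          · exact hmem h
        rw [if_neg hni, List.getElem?_set, if_neg hne]

lemma mem_patch (seq mask_locations : List Int) (x : Int) :
    x ∈ PySem.Set.inter (PySem.Set.ofList mask_locations)
          ((List.range seq.length).map (fun (i : Nat) => ((i : Int))))
      ↔ x ∈ mask_locations ∧ 0 ≤ x ∧ x < (seq.length : Int) := by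
  rw [PySem.Set.mem_inter, PySem.Set.mem_ofList]
  constructor
  · rintro ⟨h1, h2⟩
    simp only [List.mem_map, List.mem_range] at h2
    obtain ⟨i, hi, rfl⟩ := h2
    exact ⟨h1, by omega, by omega⟩
  · rintro ⟨h1, h2, h3⟩
    refine ⟨h1, ?_⟩
    simp only [List.mem_map, List.mem_range]
    exact ⟨x.toNat, by omega, by omega⟩

-- ===== VERDICT (by name: the statement is the Claim_ definition above) =====
theorem mask_sequence_spec : Claim_equal_mask_sequence := by
  intro seq mask_locations mask_id _
  unfold Spec_mask_sequence mask_sequence mask_sequence_alt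
  rw [maskA_foldl_map]
  apply List.ext_getElem?
  intro i
  have hbound : ∀ x ∈ PySem.Set.inter (PySem.Set.ofList mask_locations)
      ((List.range seq.length).map (fun (i : Nat) => ((i : Int)))),
      0 ≤ x ∧ x < (seq.length : Int) := by
    intro x hx; exact ((mem_patch seq mask_locations x).1 hx).2
  rw [foldl_set_getElem? mask_id _ seq i hbound]
  by_cases hlt : i < seq.length
  · rw [List.nil_append, List.getElem?_map, List.getElem?_range hlt]
    by_cases hmem : ((i : Int)) ∈ mask_locations
    · rw [if_pos ((mem_patch seq mask_locations _).2 ⟨hmem, by omega, by omega⟩)]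
      simp [hmem]
    · rw [if_neg (by rw [mem_patch]; tauto), List.getElem?_eq_getElem hlt]
      simp [hmem, List.getElem?_eq_getElem hlt]
  · rw [if_neg (by rw [mem_patch]; intro ⟨_, _, h⟩; omega)]
    rw [List.nil_append, List.getElem?_map,
      List.getElem?_eq_none (l := List.range seq.length) (by simpa using Nat.le_of_not_lt hlt),
      List.getElem?_eq_none (Nat.le_of_not_lt hlt)]
    rfl
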